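-- pv_equiv track=rewrite | github.com/flurinh/protos | src/protos/processing/sequence/seq_mutation_utils.py | generate_mutation_combinations
-- ===== SOURCE A (Python) =====
-- import itertools
--
-- def generate_mutation_combinations(positions: list, possible_amino_acids: list[str],
--                                    sequence: str = None):
--     # List of all 20 standard amino acids
--     all_amino_acids = ['A', 'R', 'N', 'D', 'C', 'Q', 'E', 'G', 'H', 'I',
--                        'L', 'K', 'M', 'F', 'P', 'S', 'T', 'W', 'Y', 'V']
--
--     # Generate all possible combinations for each position
--     all_combinations = itertools.product(*[
--         [(pos, aa) for aa in (all_amino_acids if 'X' in aas or '*' in aas else aas)]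
--         for pos, aas in zip(positions, possible_amino_acids)
--     ])
--
--     if sequence != None:
--         # Format combinations into a list of tuples
--         formatted_combinations = []
--         for combination in all_combinations:
--             mutation_list = []
--             for pos, aa in combination:
--                 # Fetch the original amino acid if the sequence is provided and flag is True
--                 original_aa = sequence[pos - 1]
--                 mutation_list.append(f"{original_aa}{pos}{aa}")
--             formatted_combinations.append(mutation_list)
--     else:
--         formatted_combinations = [
--             [str(pos) + aa for pos, aa in combination]
--             for combination in all_combinations
--         ]
--
--     return formatted_combinations
-- ===== SOURCE B (Python) =====
-- def generate_mutation_combinations(positions: list, possible_amino_acids: list[str],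
--                                    sequence: str = None):
--     all_amino_acids = ['A', 'R', 'N', 'D', 'C', 'Q', 'E', 'G', 'H', 'I',
--                        'L', 'K', 'M', 'F', 'P', 'S', 'T', 'W', 'Y', 'V']
--
--     def options(aas):
--         return all_amino_acids if 'X' in aas or '*' in aas else aas
--
--     pairs = list(zip(positions, possible_amino_acids))
--     # Some position admits no amino acid at all: no combination exists.
--     if any(len(options(aas)) == 0 for _, aas in pairs):
--         return []
--     # Grow the combinations one position at a time with an explicit accumulator.
--     combos = [[]]
--     for pos, aas in pairs:
--         prefix = str(pos) if sequence is None else sequence[pos - 1] + str(pos)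
--         fmts = [prefix + aa for aa in options(aas)]
--         combos = [combo + [m] for combo in combos for m in fmts]
--     return combos
-- ===== Notes on version B (the rewrite author's own statement) =====
-- stated objective: alternative
-- what changed: B drops itertools.product entirely: it grows the combinations with an explicit left-fold accumulator, extending every partial combination with the current position's pre-formatted mutation strings, after an up-front short-circuit returning [] when some position's (expanded) amino-acid set is empty.
import Mathlib
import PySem

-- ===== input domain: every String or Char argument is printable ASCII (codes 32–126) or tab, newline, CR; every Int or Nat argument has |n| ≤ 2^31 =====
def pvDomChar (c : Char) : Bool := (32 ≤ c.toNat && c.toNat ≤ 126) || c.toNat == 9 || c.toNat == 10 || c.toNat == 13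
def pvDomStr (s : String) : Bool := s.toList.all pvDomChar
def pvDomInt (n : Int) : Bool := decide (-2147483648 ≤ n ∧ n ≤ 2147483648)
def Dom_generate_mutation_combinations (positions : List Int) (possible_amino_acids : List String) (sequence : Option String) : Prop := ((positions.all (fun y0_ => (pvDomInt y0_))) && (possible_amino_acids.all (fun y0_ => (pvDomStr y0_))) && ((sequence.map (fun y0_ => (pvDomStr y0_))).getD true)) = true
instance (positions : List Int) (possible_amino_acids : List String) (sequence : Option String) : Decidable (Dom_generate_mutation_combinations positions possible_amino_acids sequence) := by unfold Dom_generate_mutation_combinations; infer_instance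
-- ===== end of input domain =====

-- B replaces A's itertools.product over (pos, aa) tuples plus trailing formatting loop by an
-- explicit accumulator fold that extends partial combinations with pre-formatted strings
-- (alternative decomposition, same cost).

-- ===== PORT A =====
def pvAllAA : List Char :=
  ['A', 'R', 'N', 'D', 'C', 'Q', 'E', 'G', 'H', 'I',
   'L', 'K', 'M', 'F', 'P', 'S', 'T', 'W', 'Y', 'V']

-- 'X' in aas / '*' in aas: single-character substring test = character membership (exact)
def pvExpand (aas : String) : List Char :=
  if 'X' ∈ aas.toList ∨ '*' ∈ aas.toList then pvAllAA else aas.toList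

-- itertools.product(*factors), leftmost factor varies slowest (exact order)
def pvProduct {α : Type} : List (List α) → List (List α)
  | [] => [[]]
  | l :: ls => l.flatMap (fun x => (pvProduct ls).map (fun r => x :: r))

-- sequence[pos - 1]: Pre_ guarantees the index is in range wherever A's formatting loop reaches it;
-- the "" default is never used there
def pvFmtA (sequence : Option String) (pr : Int × Char) : String :=
  match sequence with
  | some s => (((PySem.Str.pyGet? s (pr.1 - 1)).map (fun c => String.ofList [c])).getD ""
              ++ PySem.Int.toStr pr.1) ++ String.ofList [pr.2]
  | none => PySem.Int.toStr pr.1 ++ String.ofList [pr.2]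

def generate_mutation_combinations (positions : List Int) (possible_amino_acids : List String) (sequence : Option String) : List (List String) :=
  let factors : List (List (Int × Char)) :=
    (positions.zip possible_amino_acids).map (fun pr => (pvExpand pr.2).map (fun aa => (pr.1, aa)))
  let all_combinations := pvProduct factors
  match sequence with
  | some _ => all_combinations.map (fun combination => combination.map (fun pr => pvFmtA sequence pr))
  | none => all_combinations.map (fun combination => combination.map (fun pr => pvFmtA none pr))

-- ===== PORT B =====
def generate_mutation_combinations_alt (positions : List Int) (possible_amino_acids : List String) (sequence : Option String) : List (List String) :=
  let pairs := positions.zip possible_amino_acids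
  if pairs.any (fun pr => (pvExpand pr.2).length == 0) then []
  else
    pairs.foldl (fun combos pr =>
      let pref : String :=
        match sequence with
        | none => PySem.Int.toStr pr.1
        | some s => ((PySem.Str.pyGet? s (pr.1 - 1)).map (fun c => String.ofList [c])).getD ""
                    ++ PySem.Int.toStr pr.1
      let fmts := (pvExpand pr.2).map (fun aa => pref ++ String.ofList [aa])
      combos.flatMap (fun combo => fmts.map (fun m => combo ++ [m]))) [[]]

-- ===== PRECONDITION & SPEC =====
-- Pre_ excludes exactly the inputs where the Python A raises IndexError: sequence is provided,
-- every zipped position's expanded amino-acid set is nonempty (so the product is nonempty and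
-- A's formatting loop runs), and some position's index pos-1 is out of range. B also raises there.
def Pre_generate_mutation_combinations (positions : List Int) (possible_amino_acids : List String) (sequence : Option String) : Prop :=
  ∀ s, sequence = some s →
    (∃ pr ∈ positions.zip possible_amino_acids, pvExpand pr.2 = []) ∨
    (∀ pr ∈ positions.zip possible_amino_acids,
      -(s.toList.length : Int) ≤ pr.1 - 1 ∧ pr.1 - 1 < (s.toList.length : Int))
instance (positions : List Int) (possible_amino_acids : List String) (sequence : Option String) : Decidable (Pre_generate_mutation_combinations positions possible_amino_acids sequence) := by unfold Pre_generate_mutation_combinations; infer_instance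

def pvWitness_generate_mutation_combinations : List Int × List String × Option String :=
  ([1, 2], ["AC", "G"], some "MK")

def Spec_generate_mutation_combinations (positions : List Int) (possible_amino_acids : List String) (sequence : Option String) (out : List (List String)) : Prop := out = generate_mutation_combinations_alt positions possible_amino_acids sequence
instance (positions : List Int) (possible_amino_acids : List String) (sequence : Option String) (out : List (List String)) : Decidable (Spec_generate_mutation_combinations positions possible_amino_acids sequence out) := by unfold Spec_generate_mutation_combinations; infer_instance

-- ===== CLAIM (what is proved, stated in full; the proofs are below) =====
def Claim_equal_generate_mutation_combinations : Prop := ∀ (positions : List Int) (possible_amino_acids : List String) (sequence : Option String), Dom_generate_mutation_combinations positions possible_amino_acids sequence → Pre_generate_mutation_combinations positions possible_amino_acids sequence → Spec_generate_mutation_combinations positions possible_amino_acids sequence (generate_mutation_combinations positions possible_amino_acids sequence)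

-- ===== LEMMAS AND PROOFS =====
theorem pvProduct_map {α β : Type} (g : α → β) :
    ∀ (ls : List (List α)), pvProduct (ls.map (List.map g)) = (pvProduct ls).map (List.map g)
  | [] => rfl
  | l :: ls => by
      simp [pvProduct, pvProduct_map g ls, List.flatMap_map, List.map_flatMap, List.map_map]
      rfl

theorem pvProduct_pull (zs : List (Int × String)) (f : Int × Char → String) :
    (pvProduct (zs.map (fun pr => (pvExpand pr.2).map (fun aa => (pr.1, aa))))).map (List.map f)
      = pvProduct (zs.map (fun pr => (pvExpand pr.2).map (fun aa => f (pr.1, aa)))) := by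
  rw [show zs.map (fun pr => (pvExpand pr.2).map (fun aa => f (pr.1, aa)))
        = (zs.map (fun pr => (pvExpand pr.2).map (fun aa => (pr.1, aa)))).map (List.map f) by
      simp [List.map_map, Function.comp_def]]
  rw [pvProduct_map]

theorem pvProduct_of_mem_nil {α : Type} :
    ∀ (ls : List (List α)), [] ∈ ls → pvProduct ls = []
  | l :: ls, h => by
      rcases List.mem_cons.1 h with h | h
      · simp [pvProduct, ← h]
      · simp [pvProduct, pvProduct_of_mem_nil ls h]

theorem pvFoldl_cross {α β : Type} (F : β → List α) :
    ∀ (ps : List β) (acc : List (List α)),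
      ps.foldl (fun combos pr => combos.flatMap (fun c => (F pr).map (fun x => c ++ [x]))) acc
        = acc.flatMap (fun c => (pvProduct (ps.map F)).map (fun r => c ++ r))
  | [], acc => by simp [pvProduct]
  | p :: ps, acc => by
      rw [List.foldl_cons, pvFoldl_cross F ps]
      simp [pvProduct, List.map_flatMap, List.flatMap_assoc, List.flatMap_map, List.map_map,
            Function.comp_def, List.append_assoc]

theorem pvWitness_ok :
    Dom_generate_mutation_combinations pvWitness_generate_mutation_combinations.1
      pvWitness_generate_mutation_combinations.2.1 pvWitness_generate_mutation_combinations.2.2 ∧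
    Pre_generate_mutation_combinations pvWitness_generate_mutation_combinations.1
      pvWitness_generate_mutation_combinations.2.1 pvWitness_generate_mutation_combinations.2.2 := by
  constructor <;> decide

-- ===== VERDICT (by name: the statement is the Claim_ definition above) =====
theorem generate_mutation_combinations_spec : Claim_equal_generate_mutation_combinations := by
  intro positions pam sequence _ _
  unfold Spec_generate_mutation_combinations
  simp only [generate_mutation_combinations, generate_mutation_combinations_alt]
  by_cases hE : ∃ pr ∈ positions.zip pam, pvExpand pr.2 = []
  · -- some factor is empty: both sides are []
    obtain ⟨pr, hpr, hnil⟩ := hE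
    have hany : (positions.zip pam).any (fun pr => (pvExpand pr.2).length == 0) = true := by
      refine List.any_eq_true.2 ⟨pr, hpr, ?_⟩
      simp [hnil]
    have hmem : ([] : List (Int × Char)) ∈
        (positions.zip pam).map (fun pr => (pvExpand pr.2).map (fun aa => ((pr.1 : Int), aa))) :=
      List.mem_map.2 ⟨pr, hpr, by simp [hnil]⟩
    have hprod := pvProduct_of_mem_nil _ hmem
    cases sequence <;> simp [hany, hprod]
  · -- no factor empty: B's accumulator fold equals A's product
    have hany : (positions.zip pam).any (fun pr => (pvExpand pr.2).length == 0) = false := by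
      rw [List.any_eq_false]
      intro pr hpr
      simp only [beq_iff_eq, List.length_eq_zero_iff]
      exact fun h => hE ⟨pr, hpr, h⟩
    cases sequence with
    | none =>
        rw [hany]
        simp only [Bool.false_eq_true, if_false]
        rw [pvFoldl_cross (fun pr : Int × String =>
              (pvExpand pr.2).map (fun aa => PySem.Int.toStr pr.1 ++ String.ofList [aa]))]
        rw [pvProduct_pull (positions.zip pam) (fun pr => pvFmtA none pr)]
        simp [pvFmtA]
    | some s =>
        rw [hany]
        simp only [Bool.false_eq_true, if_false]
        rw [pvFoldl_cross (fun pr : Int × String =>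
              (pvExpand pr.2).map (fun aa =>
                (((PySem.Str.pyGet? s (pr.1 - 1)).map (fun c => String.ofList [c])).getD ""
                  ++ PySem.Int.toStr pr.1) ++ String.ofList [aa]))]
        rw [pvProduct_pull (positions.zip pam) (fun pr => pvFmtA (some s) pr)]
        simp [pvFmtA]
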